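-- pv_equiv track=rewrite | github.com/j0nnie99/Algorithm | 프로그래머스/lv0/120896. 한 번만 등장한 문자/한 번만 등장한 문자.py | solution
-- ===== SOURCE A (Python) =====
-- def solution(s):
--     answer = ''
--     s = list(s)
--     alist = []
--
--     for i in s:
--         if s.count(i) == 1:
--             alist.append(i)
--
--     alist.sort()
--
--     for i in alist:
--         answer += i
--     return answer
-- ===== SOURCE B (Python) =====
-- def solution(s):
--     # Sort the characters first, then a single pass over runs of equal
--     # consecutive characters keeps exactly the runs of length 1.
--     t = sorted(s)
--     out = []
--     while t:
--         c = t[0]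
--         k = 1
--         while k < len(t) and t[k] == c:
--             k += 1
--         if k == 1:
--             out.append(c)
--         t = t[k:]
--     return ''.join(out)
-- ===== Notes on version B (the rewrite author's own statement) =====
-- stated objective: faster
-- what changed: Replaced the quadratic scan that calls s.count(i) for every character (then sorts the survivors) by a sort-first pass that groups consecutive equal characters and keeps the length-1 runs, which are already in sorted order.
import Mathlib
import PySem

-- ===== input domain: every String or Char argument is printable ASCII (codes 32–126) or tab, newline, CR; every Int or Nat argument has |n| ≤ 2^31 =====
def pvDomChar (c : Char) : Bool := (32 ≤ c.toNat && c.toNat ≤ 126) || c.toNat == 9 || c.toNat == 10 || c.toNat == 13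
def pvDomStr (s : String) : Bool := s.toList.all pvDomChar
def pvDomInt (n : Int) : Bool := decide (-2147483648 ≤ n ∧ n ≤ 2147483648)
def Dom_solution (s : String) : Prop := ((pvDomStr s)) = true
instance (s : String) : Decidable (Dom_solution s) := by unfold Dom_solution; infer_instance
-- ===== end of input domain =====

-- B replaces A's per-character s.count scan by sort-then-group-consecutive-runs (objective: faster).

-- ===== PORT A =====
-- A: collect characters whose count in s is 1, sort them, concatenate.
def solution (s : String) : String :=
  let l := s.toList
  let alist := l.foldl (fun acc i => if PySem.List.count l i == 1 then acc ++ [i] else acc) []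
  let alist := PySem.List.sorted alist (fun x => x) false
  alist.foldl (fun answer i => answer.push i) ""

-- ===== PORT B =====
-- B's run scan: t nonempty → take the run of the head character; keep the head iff the run
-- has length 1 (k == 1 in Source B); continue on the rest (t = t[k:]).
def runScan : List Char → List Char
  | [] => []
  | c :: rest =>
      let run := rest.takeWhile (fun x => x == c)
      (if run.length == 0 then [c] else []) ++ runScan (rest.dropWhile (fun x => x == c))
termination_by t => t.length
decreasing_by
  simpa using Nat.lt_succ_of_le (List.length_dropWhile_le _ _)

def solution_alt (s : String) : String :=
  String.ofList (runScan (PySem.List.sorted s.toList (fun x => x) false))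

-- ===== PRECONDITION & SPEC =====
def Spec_solution (s : String) (out : String) : Prop := out = solution_alt s
instance (s : String) (out : String) : Decidable (Spec_solution s out) := by unfold Spec_solution; infer_instance

-- ===== CLAIM (what is proved, stated in full; the proofs are below) =====
def Claim_equal_solution : Prop := ∀ (s : String), Dom_solution s → Spec_solution s (solution s)

-- ===== LEMMAS AND PROOFS =====

theorem foldl_push_toList (l : List Char) (acc : String) :
    (l.foldl (fun a c => a.push c) acc).toList = acc.toList ++ l := by
  induction l generalizing acc with
  | nil => simp
  | cons c t ih => simp [List.foldl, ih]

-- On a (≤)-sorted list, the run scan is exactly the filter of count-1 characters.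
theorem runScan_eq_filter (t : List Char) (h : t.Pairwise (· ≤ ·)) :
    runScan t = t.filter (fun c => t.count c == 1) := by
  induction t using runScan.induct with
  | case1 => simp [runScan]
  | case2 c rest ih =>
    have hsplit : rest = rest.takeWhile (fun x => x == c) ++ rest.dropWhile (fun x => x == c) :=
      (List.takeWhile_append_dropWhile).symm
    set tk := rest.takeWhile (fun x => x == c) with htk
    set dr := rest.dropWhile (fun x => x == c) with hdr
    -- every element of the run equals c
    have htkc : ∀ x ∈ tk, x = c := by
      intro x hx
      simpa using List.mem_takeWhile_imp hx
    -- c does not occur in the dropped part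
    have hcdr : ∀ x ∈ dr, x ≠ c := by
      intro x hx
      have hpw : rest.Pairwise (· ≤ ·) := h.of_cons
      have hpwdr : dr.Pairwise (· ≤ ·) := hpw.sublist (hdr ▸ List.dropWhile_sublist _)
      cases hhead : dr with
      | nil => simp [hhead] at hx
      | cons d ds =>
        have hdne : d ≠ c := by
          have := List.head?_dropWhile_not (fun x => x == c) rest
          simp [← hdr, hhead] at this
          exact this
        have hcled : c ≤ d := by
          have hdrest : d ∈ rest := by
            have : d ∈ dr := by simp [hhead]
            exact (hdr ▸ List.dropWhile_sublist (p := fun x => x == c) (l := rest)).mem this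
          exact (List.pairwise_cons.mp h).1 d hdrest
        have hcd : c < d := lt_of_le_of_ne hcled (Ne.symm hdne)
        rcases (by simpa [hhead] using hx : x = d ∨ x ∈ ds) with rfl | hxds
        · exact ne_of_gt hcd
        · have : d ≤ x := (List.pairwise_cons.mp (hhead ▸ hpwdr)).1 x hxds
          exact ne_of_gt (lt_of_lt_of_le hcd this)
    have hcount_c : (c :: rest).count c = 1 + tk.length := by
      have h1 : tk.count c = tk.length := by
        rw [List.count_eq_length]
        intro x hx; simpa using (htkc x hx).symm
      have h2 : dr.count c = 0 := by
        rw [List.count_eq_zero]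
        intro hmem; exact hcdr c hmem rfl
      rw [List.count_cons_self]
      conv_lhs => rw [hsplit]
      rw [List.count_append, h1, h2]
      omega
    -- the recursive tail is pairwise-sorted
    have hpwdr : dr.Pairwise (· ≤ ·) := h.of_cons.sublist (hdr ▸ List.dropWhile_sublist _)
    rw [runScan]
    simp only [← htk, ← hdr]
    rw [ih hpwdr]
    have hftk : tk.filter (fun x => (c :: rest).count x == 1) = [] := by
      rw [List.filter_eq_nil_iff]
      intro x hx
      have hlen : 0 < tk.length := List.length_pos_of_mem hx
      have hxc := htkc x hx
      subst hxc
      simp only [hcount_c, beq_iff_eq]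
      omega
    have hcc : ∀ x, List.count x (c :: (tk ++ dr)) = List.count x (c :: rest) := by
      intro x; rw [← hsplit]
    have hfilter_dr :
        dr.filter (fun x => (c :: rest).count x == 1) = dr.filter (fun x => dr.count x == 1) := by
      apply List.filter_congr
      intro x hx
      have hxc : x ≠ c := hcdr x hx
      have hxtk : tk.count x = 0 := by
        rw [List.count_eq_zero]; intro hmem
        exact hxc (htkc x hmem)
      have : (c :: rest).count x = dr.count x := by
        rw [List.count_cons_of_ne (Ne.symm hxc)]
        conv_lhs => rw [hsplit]
        rw [List.count_append, hxtk]
        omega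
      simp [this]
    have hrest_filter : rest.filter (fun x => List.count x (c :: rest) == 1)
        = dr.filter (fun x => List.count x dr == 1) := by
      conv_lhs => rw [hsplit]
      simp only [hcc]
      rw [List.filter_append, hftk, hfilter_dr, List.nil_append]
    have hcrest : List.count c rest = tk.length := by
      have := hcount_c
      rw [List.count_cons_self] at this
      omega
    conv_rhs => rw [List.filter_cons]
    by_cases htk0 : tk.length = 0
    · simp [htk0, hrest_filter, hcrest]
    · simp [htk0, hrest_filter, hcrest]

theorem count_sorted (l : List Char) (x : Char) :
    (PySem.List.sorted l (fun y => y) false).count x = l.count x :=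
  (PySem.List.sorted_perm l (fun y => y) false).count_eq x

-- ===== VERDICT (by name: the statement is the Claim_ definition above) =====
theorem solution_spec : Claim_equal_solution := by
  intro s _
  unfold Spec_solution solution solution_alt
  apply String.toList_injective
  rw [foldl_push_toList]
  simp only [String.toList_ofList, String.toList_empty, List.nil_append]
  set l := s.toList with hl
  set t := PySem.List.sorted l (fun x => x) false with ht
  have hperm : t.Perm l := PySem.List.sorted_perm l (fun x => x) false
  have hpw : t.Pairwise (· ≤ ·) := PySem.List.sorted_pairwise l (fun x => x)
  rw [runScan_eq_filter t hpw]
  -- predicate over t's counts equals predicate over l's counts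
  have hpred : t.filter (fun c => t.count c == 1) = t.filter (fun c => l.count c == 1) := by
    apply List.filter_congr
    intro x _
    rw [ht, count_sorted]
  rw [hpred]
  -- A's alist is the filter of l
  have hA : l.foldl (fun acc i => if PySem.List.count l i == 1 then acc ++ [i] else acc) [] =
      l.filter (fun c => l.count c == 1) := by
    have := PySem.List.foldl_append_if (fun i => PySem.List.count l i == 1) (fun i => i) l []
    simpa [PySem.List.count] using this
  rw [hA]
  -- both sides: sorted of the same filter
  apply PySem.List.sorted_eq_of_perm_of_pairwise_lt
  · exact hperm.filter _
  · -- filter of a sorted list is pairwise ≤ ; count-1 elements make it nodup, hence pairwise <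
    have hle : (t.filter (fun c => l.count c == 1)).Pairwise (· ≤ ·) :=
      hpw.sublist (List.filter_sublist)
    have hnd : (t.filter (fun c => l.count c == 1)).Nodup := by
      rw [List.nodup_iff_count_le_one]
      intro a
      have hsub : (t.filter (fun c => l.count c == 1)).count a ≤ t.count a :=
        (List.filter_sublist).count_le a
      by_cases hm : a ∈ t.filter (fun c => l.count c == 1)
      · have h1 : l.count a = 1 := by simpa using List.of_mem_filter hm
        have h2 : t.count a = 1 := by rw [ht, count_sorted]; exact h1
        omega
      · simp [List.count_eq_zero_of_not_mem hm]
    exact (hle.and hnd).imp (fun h => lt_of_le_of_ne h.1 h.2)
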